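-- pv_equiv track=rewrite | github.com/eunhee-dev/problem-solving | 0x0c. backtracking/1759번. 암호 만들기/solve_itertools.py | solve
-- ===== SOURCE A (Python) =====
-- from itertools import combinations
--
-- def solve(l: int, chars: list[str]) -> list[str]:
--     sequences = []
--     chars.sort()
--     vowels = {"a", "e", "i", "o", "u"}
--     for comb in combinations(chars, l):
--         v_cnt = sum(1 for ch in comb if ch in vowels)
--         cons_cnt = l - v_cnt
--         if v_cnt >= 1 and cons_cnt >= 2:
--             sequences.append("".join(comb))
--     return sequences
-- ===== SOURCE B (Python) =====
-- def solve(l: int, chars: list[str]) -> list[str]: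
--     chars.sort()
--     vowels = {"a", "e", "i", "o", "u"}
--     out = []
--
--     def pick(rest, k, cur, v):
--         if k == 0:
--             if v >= 1 and l - v >= 2:
--                 out.append("".join(cur))
--             return
--         for i in range(len(rest)):
--             ch = rest[i]
--             pick(rest[i + 1:], k - 1, cur + [ch], v + (1 if ch in vowels else 0))
--
--     pick(chars, l, [], 0)
--     return out
-- ===== Notes on version B (the rewrite author's own statement) =====
-- stated objective: alternative
-- what changed: B replaces A's materialize-all-itertools-combinations-then-recount pass by a recursive backtracking over the sorted suffix that carries the partial pick and a running vowel count, joining only at accepted leaves.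
import Mathlib
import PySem

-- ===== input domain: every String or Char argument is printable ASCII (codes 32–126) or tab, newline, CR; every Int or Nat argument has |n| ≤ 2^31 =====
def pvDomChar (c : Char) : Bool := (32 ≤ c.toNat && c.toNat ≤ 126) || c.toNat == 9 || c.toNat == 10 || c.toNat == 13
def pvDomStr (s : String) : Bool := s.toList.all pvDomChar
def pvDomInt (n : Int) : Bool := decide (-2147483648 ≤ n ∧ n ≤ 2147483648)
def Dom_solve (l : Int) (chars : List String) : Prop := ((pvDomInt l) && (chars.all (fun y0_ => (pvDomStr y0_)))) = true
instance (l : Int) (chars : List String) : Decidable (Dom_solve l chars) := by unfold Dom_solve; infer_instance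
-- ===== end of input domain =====

-- B replaces A's materialized itertools.combinations + per-tuple vowel recount by a recursive
-- backtracking over the sorted suffix carrying the running vowel count (alternative decomposition,
-- same cost). Both A and B sort `chars` in place; the equivalence proved is about the return value.


-- ===== PORT A =====
-- itertools.combinations(xs, k): k-subsequences in the order itertools yields them
-- (those containing xs[0] first, recursively).
def pyCombs : List String → Nat → List (List String)
  | _, 0 => [[]]
  | [], _ + 1 => []
  | x :: xs, k + 1 => (pyCombs xs k).map (fun c => x :: c) ++ pyCombs xs (k + 1)

-- the vowel set both Pythons build (same literal in Source A and Source B)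
def pvVowels : PySem.Set String := PySem.Set.ofList ["a", "e", "i", "o", "u"]

-- port of A (meaningful for 0 ≤ l; Python raises ValueError on negative l — excluded by Pre_)
def solve (l : Int) (chars : List String) : List String :=
  let s := PySem.List.sorted chars (fun x => x) false
  (pyCombs s l.toNat).foldl (fun sequences comb =>
    let v_cnt : Int := (comb.map (fun ch => if pvVowels.contains ch then (1 : Int) else 0)).sum
    if v_cnt ≥ 1 ∧ l - v_cnt ≥ 2 then sequences ++ [PySem.Str.join "" comb] else sequences) []

-- ===== PORT B =====
-- pick(rest, k, cur, v) of Source B: results of the leaf appends, in recursion order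
def pickB (l : Int) : List String → Int → List String → Int → List String
  | [], k, cur, v =>
      if k = 0 then (if v ≥ 1 ∧ l - v ≥ 2 then [PySem.Str.join "" cur] else []) else []
  | ch :: rs, k, cur, v =>
      if k = 0 then (if v ≥ 1 ∧ l - v ≥ 2 then [PySem.Str.join "" cur] else [])
      else
        pickB l rs (k - 1) (cur ++ [ch]) (v + (if pvVowels.contains ch then 1 else 0)) ++
        pickB l rs k cur v

def solve_alt (l : Int) (chars : List String) : List String :=
  pickB l (PySem.List.sorted chars (fun x => x) false) l [] 0

-- ===== PRECONDITION & SPEC =====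
-- Pre_ excludes l < 0, where itertools.combinations makes A raise ValueError (B returns []).
def Pre_solve (l : Int) (chars : List String) : Prop := 0 ≤ l
instance (l : Int) (chars : List String) : Decidable (Pre_solve l chars) := by unfold Pre_solve; infer_instance
def pvWitness_solve : Int × List String := (4, ["a", "t", "c", "i", "s", "w"])

def Spec_solve (l : Int) (chars : List String) (out : List String) : Prop := out = solve_alt l chars
instance (l : Int) (chars : List String) (out : List String) : Decidable (Spec_solve l chars out) := by unfold Spec_solve; infer_instance

-- ===== CLAIM (what is proved, stated in full; the proofs are below) =====
def Claim_equal_solve : Prop := ∀ (l : Int) (chars : List String), Dom_solve l chars → Pre_solve l chars → Spec_solve l chars (solve l chars)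

-- ===== LEMMAS AND PROOFS =====
-- running vowel count of a combination, as A computes it
def vcnt (c : List String) : Int :=
  (c.map (fun ch => if pvVowels.contains ch then (1 : Int) else 0)).sum

-- B's backtracking equals "filter-and-join over A's combination list", with accumulators abstracted
lemma pickB_eq (l : Int) (rest : List String) (k : Nat) (cur : List String) (v : Int) :
    pickB l rest (k : Int) cur v =
    (pyCombs rest k).flatMap (fun c =>
      if v + vcnt c ≥ 1 ∧ l - (v + vcnt c) ≥ 2 then [PySem.Str.join "" (cur ++ c)] else []) := by
  induction rest generalizing k cur v with
  | nil =>
      cases k with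
      | zero => simp [pickB, pyCombs, vcnt]
      | succ m => simp [pickB, pyCombs]; omega
  | cons ch rs ih =>
      cases k with
      | zero => simp [pickB, pyCombs, vcnt]
      | succ m =>
          have hk : ¬ ((m + 1 : Nat) : Int) = 0 := by omega
          have hk1 : ((m + 1 : Nat) : Int) - 1 = (m : Int) := by omega
          rw [pickB, if_neg hk, hk1, ih, ih]
          simp only [pyCombs, List.flatMap_append, List.flatMap_map]
          congr 1
          apply List.flatMap_congr  -- pointwise: shift ch from the combination into the accumulators
          intro c _
          have hv : v + vcnt (ch :: c) =
              (v + (if pvVowels.contains ch then 1 else 0)) + vcnt c := by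
            simp [vcnt]; ring
          simp only [hv, List.append_assoc, List.cons_append, List.nil_append]

-- ===== VERDICT (by name: the statement is the Claim_ definition above) =====
theorem solve_spec : Claim_equal_solve := by
  intro l chars _ hpre
  unfold Spec_solve solve solve_alt
  have hl : ((l.toNat : Nat) : Int) = l := Int.toNat_of_nonneg hpre
  have hfold : ∀ (L : List (List String)) (acc : List String),
      L.foldl (fun sequences comb =>
        let v_cnt : Int := (comb.map (fun ch => if pvVowels.contains ch then (1 : Int) else 0)).sum
        if v_cnt ≥ 1 ∧ l - v_cnt ≥ 2 then sequences ++ [PySem.Str.join "" comb] else sequences) acc =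
      acc ++ L.flatMap (fun c =>
        if vcnt c ≥ 1 ∧ l - vcnt c ≥ 2 then [PySem.Str.join "" c] else []) := by
    intro L
    induction L with
    | nil => intro acc; simp
    | cons c L ihL =>
        intro acc
        rw [List.foldl_cons, ihL, List.flatMap_cons]
        show (if vcnt c ≥ 1 ∧ l - vcnt c ≥ 2 then acc ++ [PySem.Str.join "" c] else acc) ++
            List.flatMap _ L =
          acc ++ ((if vcnt c ≥ 1 ∧ l - vcnt c ≥ 2 then [PySem.Str.join "" c] else []) ++
            List.flatMap _ L)
        split_ifs <;> simp
  rw [hfold]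
  have hb := pickB_eq l (PySem.List.sorted chars (fun x => x) false) l.toNat [] 0
  rw [hl] at hb
  rw [hb]
  simp
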